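-- pv_equiv track=rewrite | github.com/rensje/codeadvent2017 | day9.py | remove_ignore
-- ===== SOURCE A (Python) =====
-- def remove_ignore(data):
--     chars = []
--     ignore = False
--     for char in data:
--         if ignore:
--             ignore=False
--             continue
--         if char=="!":
--             ignore=True
--         else:
--             chars.append(char)
--     return "".join(chars)
-- ===== SOURCE B (Python) =====
-- import re
--
-- def remove_ignore(data):
--     # One regex substitution: each '!' together with at most one following
--     # character (DOTALL so newlines count too) is deleted in a single pass.
--     return re.sub(r'!.?', '', data, flags=re.DOTALL)
-- ===== Notes on version B (the rewrite author's own statement) =====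
-- stated objective: idiomatic
-- what changed: Replaces the boolean ignore-flag state machine with a single regex substitution (pattern !.? with DOTALL) that deletes each exclamation mark together with its optional following character in one library pass.
import Mathlib
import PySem

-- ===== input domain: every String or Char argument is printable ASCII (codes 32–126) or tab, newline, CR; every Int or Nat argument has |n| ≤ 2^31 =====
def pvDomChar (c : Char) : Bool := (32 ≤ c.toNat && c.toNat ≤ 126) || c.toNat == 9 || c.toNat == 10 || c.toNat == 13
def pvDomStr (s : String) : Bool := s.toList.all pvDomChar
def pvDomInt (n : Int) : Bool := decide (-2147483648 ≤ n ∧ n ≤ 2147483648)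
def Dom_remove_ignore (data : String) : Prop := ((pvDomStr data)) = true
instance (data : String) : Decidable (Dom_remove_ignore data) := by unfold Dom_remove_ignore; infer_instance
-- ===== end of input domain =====

-- B replaces A's boolean ignore-flag state machine with a single regex substitution (pattern !.? with DOTALL); same O(n) but measurably faster by constant factor (C regex engine vs Python-level loop).


-- ===== PORT A =====
-- A's loop: state (chars, ignore); branches in source order.
def pvAStep (st : List Char × Bool) (char : Char) : List Char × Bool :=
  if st.2 then (st.1, false)
  else if char = '!' then (st.1, true)
  else (st.1 ++ [char], false)

def remove_ignore (data : String) : String :=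
  String.mk (data.toList.foldl pvAStep ([], false)).1

-- ===== PORT B =====
-- Hand port of re.sub(r'!.?', '', data, re.DOTALL): the regex engine's leftmost scan —
-- at each position, if '!' matches, the match greedily takes one following character
-- (if any) and is replaced by the empty string; otherwise the character is kept and
-- scanning resumes at the next position. Exact for this pattern on all inputs.
def pvRegexSub : List Char → List Char
  | [] => []
  | char :: rest =>
      if char = '!' then
        match rest with
        | [] => []                  -- '!' matched with the optional '.' empty
        | _ :: rest' => pvRegexSub rest'  -- '!' plus one character matched
      else char :: pvRegexSub rest

def remove_ignore_alt (data : String) : String :=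
  String.mk (pvRegexSub data.toList)

-- ===== PRECONDITION & SPEC =====
def Spec_remove_ignore (data : String) (out : String) : Prop := out = remove_ignore_alt data
instance (data : String) (out : String) : Decidable (Spec_remove_ignore data out) := by unfold Spec_remove_ignore; infer_instance

-- ===== CLAIM (what is proved, stated in full; the proofs are below) =====
def Claim_equal_remove_ignore : Prop := ∀ (data : String), Dom_remove_ignore data → Spec_remove_ignore data (remove_ignore data)

-- ===== LEMMAS AND PROOFS =====
theorem pvFoldl_eq_sub : ∀ (n : Nat) (l : List Char), l.length ≤ n →
    ∀ acc : List Char, (l.foldl pvAStep (acc, false)).1 = acc ++ pvRegexSub l := by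
  intro n
  induction n with
  | zero =>
      intro l hl acc
      have : l = [] := List.eq_nil_of_length_eq_zero (Nat.le_zero.mp hl)
      subst this; simp [pvRegexSub]
  | succ n ih =>
      intro l hl acc
      cases l with
      | nil => simp [pvRegexSub]
      | cons c r =>
          by_cases hc : c = '!'
          · subst hc
            cases r with
            | nil => simp [pvRegexSub, pvAStep]
            | cons d r' =>
                have hlen : r'.length ≤ n := by
                  simp at hl; omega
                simp [pvRegexSub, pvAStep, List.foldl_cons, ih r' hlen acc]
          · have hlen : r.length ≤ n := by simp at hl; omega
            rw [List.foldl_cons]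
            simp only [pvAStep, Bool.false_eq_true, if_false, if_neg hc]
            rw [ih r hlen (acc ++ [c])]
            conv_rhs => rw [pvRegexSub.eq_def]
            simp [hc]

-- ===== VERDICT (by name: the statement is the Claim_ definition above) =====
theorem remove_ignore_spec : Claim_equal_remove_ignore := by
  intro data _
  unfold Spec_remove_ignore remove_ignore remove_ignore_alt
  have := pvFoldl_eq_sub data.toList.length data.toList (Nat.le_refl _) []
  simp [this]
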